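-- pv_equiv track=rewrite | github.com/Amedar-Asterisk/U-Statistics-python | utils.py | standardize_indexes
-- ===== SOURCE A (Python) =====
-- def standardize_indexes(lst: list) -> tuple:
--     """
--     Standardize the index list to continuous integer indexes.
--
--     Args:
--         lst (list): List of index pairs. Each pair is a list of some integers.
--
--     Returns:
--         tuple: Standardized index list and mapping from standardized to original indexes.
--     """
--     num_to_index = {}
--     standardized_lst = []
--     standardized_to_original = {}
--     current_index = 0
--     for t in lst:
--         standardized_pair = []
--         for num in t:
--             if num not in num_to_index:
--                 num_to_index[num] = current_index
--                 standardized_to_original[current_index] = num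
--                 current_index += 1
--             standardized_pair.append(num_to_index[num])
--         standardized_lst.append(standardized_pair)
--
--     return standardized_lst, standardized_to_original
-- ===== SOURCE B (Python) =====
-- def standardize_indexes(lst: list) -> tuple:
--     """Table-first re-implementation: build the first-appearance ordering of all
--     indexes in one flattening pass, then remap each pair in a second pass."""
--     uniques = list(dict.fromkeys(num for t in lst for num in t))
--     num_to_index = {v: i for i, v in enumerate(uniques)}
--     standardized_lst = [[num_to_index[num] for num in t] for t in lst]
--     return standardized_lst, dict(enumerate(uniques))
-- ===== Notes on version B (the rewrite author's own statement) =====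
-- stated objective: idiomatic
-- what changed: A interleaves dictionary building and remapping in one nested loop with a running counter; B first flattens the pairs and computes the first-appearance unique list with dict.fromkeys, builds both mappings from enumerate(uniques), and then remaps all pairs in a separate comprehension pass.
import Mathlib
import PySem

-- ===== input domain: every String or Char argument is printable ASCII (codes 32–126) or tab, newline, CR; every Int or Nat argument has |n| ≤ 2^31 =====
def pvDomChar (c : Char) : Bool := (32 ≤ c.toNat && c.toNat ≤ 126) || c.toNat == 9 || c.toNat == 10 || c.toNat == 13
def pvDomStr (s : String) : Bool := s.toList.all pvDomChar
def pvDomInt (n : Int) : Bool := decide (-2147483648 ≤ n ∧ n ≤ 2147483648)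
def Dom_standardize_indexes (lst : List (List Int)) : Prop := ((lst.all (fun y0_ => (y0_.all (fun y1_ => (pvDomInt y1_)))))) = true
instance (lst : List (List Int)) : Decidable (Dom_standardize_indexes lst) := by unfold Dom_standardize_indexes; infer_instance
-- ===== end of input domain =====

-- B rebuilds the same result table-first: one flattening pass computes the first-appearance
-- unique list, both mappings come from enumerating it, and a separate second pass remaps the
-- pairs — instead of A's single nested loop interleaving dictionary growth with remapping.

-- ===== PORT A =====
-- inner loop body; state = (num_to_index, standardized_pair, standardized_to_original, current_index)
def siInnerA (s : PySem.Dict Int Int × List Int × PySem.Dict Int Int × Int) (num : Int) :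
    PySem.Dict Int Int × List Int × PySem.Dict Int Int × Int :=
  if s.1.contains num = false then
    let n2i := s.1.insert num s.2.2.2
    let s2o := s.2.2.1.insert s.2.2.2 num
    -- num_to_index[num] is exact as getD with any default: the key was just inserted
    (n2i, s.2.1 ++ [n2i.getD num 0], s2o, s.2.2.2 + 1)
  else
    (s.1, s.2.1 ++ [s.1.getD num 0], s.2.2.1, s.2.2.2)

-- outer loop body; state = (num_to_index, standardized_lst, standardized_to_original, current_index)
def siOuterA (st : PySem.Dict Int Int × List (List Int) × PySem.Dict Int Int × Int) (t : List Int) :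
    PySem.Dict Int Int × List (List Int) × PySem.Dict Int Int × Int :=
  let inner := t.foldl siInnerA (st.1, ([] : List Int), st.2.2.1, st.2.2.2)
  (inner.1, st.2.1 ++ [inner.2.1], inner.2.2.1, inner.2.2.2)

def standardize_indexes (lst : List (List Int)) : List (List Int) × (List (Int × Int)) :=
  let fin := lst.foldl siOuterA (PySem.Dict.empty, ([] : List (List Int)), PySem.Dict.empty, (0 : Int))
  (fin.2.1, fin.2.2.1.items)

-- ===== PORT B =====
def standardize_indexes_alt (lst : List (List Int)) : List (List Int) × (List (Int × Int)) :=
  -- list(dict.fromkeys(flattened)) is PySem.List.dedup of the flattening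
  let uniques := PySem.List.dedup (lst.flatMap (fun t => t))
  let num_to_index : PySem.Dict Int Int :=
    PySem.Dict.ofList ((PySem.List.enumerate uniques).map (fun p => (p.2, p.1)))
  -- num_to_index[num] is exact as getD with any default: every num occurs in uniques
  (lst.map (fun t => t.map (fun num => num_to_index.getD num 0)),
   (PySem.Dict.ofList (PySem.List.enumerate uniques)).items)

-- ===== PRECONDITION & SPEC =====
def Spec_standardize_indexes (lst : List (List Int)) (out : List (List Int) × (List (Int × Int))) : Prop := out = standardize_indexes_alt lst
instance (lst : List (List Int)) (out : List (List Int) × (List (Int × Int))) : Decidable (Spec_standardize_indexes lst out) := by unfold Spec_standardize_indexes; infer_instance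

-- ===== CLAIM (what is proved, stated in full; the proofs are below) =====
def Claim_equal_standardize_indexes : Prop := ∀ (lst : List (List Int)), Dom_standardize_indexes lst → Spec_standardize_indexes lst (standardize_indexes lst)

-- ===== LEMMAS AND PROOFS =====

-- canonical dictionaries built from a "seen so far" list u:
-- mkN u maps each element of u to its position, mkS u maps each position to its element
def mkN (u : List Int) : PySem.Dict Int Int :=
  PySem.Dict.mk ((PySem.List.enumerate u).map (fun p => (p.2, p.1)))
def mkS (u : List Int) : PySem.Dict Int Int :=
  PySem.Dict.mk (PySem.List.enumerate u)

theorem enumerate_append (u v : List Int) (s : Int) :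
    PySem.List.enumerate (u ++ v) s
      = PySem.List.enumerate u s ++ PySem.List.enumerate v (s + u.length) := by
  induction u generalizing s with
  | nil => simp [PySem.List.enumerate_nil]
  | cons a u ih =>
      simp [PySem.List.enumerate_cons, ih (s+1)]
      ring_nf

theorem keys_mkN (u : List Int) : (mkN u).keys = u := by
  simp only [mkN, PySem.Dict.keys_mk, List.map_map]
  have h : ((fun x : Int × Int => x.1) ∘ fun p : Int × Int => (p.2, p.1)) = (fun p => p.2) := rfl
  rw [h]
  exact PySem.List.map_snd_enumerate u 0

theorem contains_mkN (u : List Int) (num : Int) :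
    (mkN u).contains num = decide (num ∈ u) := by
  rw [PySem.Dict.contains_eq_decide_mem_keys, keys_mkN]

theorem get?_mk_append (l1 l2 : List (Int × Int)) (k : Int) (h : k ∈ l1.map Prod.fst) :
    (PySem.Dict.mk (l1 ++ l2)).get? k = (PySem.Dict.mk l1).get? k := by
  induction l1 with
  | nil => simp at h
  | cons p l1 ih =>
      rcases p with ⟨a, b⟩
      by_cases hk : a = k
      · simp [PySem.Dict.get?_mk_cons, hk]
      · simp [List.cons_append, PySem.Dict.get?_mk_cons, hk]
        apply ih
        simp at h
        rcases h with h | ⟨x, hx⟩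
        · exact absurd h.symm hk
        · exact List.mem_map.mpr ⟨(k, x), hx, rfl⟩

-- once a number is in the seen-list its lookup is stable under growing the list
theorem getD_mkN_stable (u v : List Int) (num : Int) (h : num ∈ u) :
    (mkN (u ++ v)).getD num 0 = (mkN u).getD num 0 := by
  rw [PySem.Dict.getD_eq_get?_getD, PySem.Dict.getD_eq_get?_getD]
  congr 1
  have hitems : ((PySem.List.enumerate (u ++ v) (0:Int)).map (fun p => (p.2, p.1)))
      = ((PySem.List.enumerate u (0:Int)).map (fun p => (p.2, p.1)))
        ++ ((PySem.List.enumerate v ((0:Int) + u.length)).map (fun p => (p.2, p.1))) := by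
    rw [enumerate_append]; simp
  show (PySem.Dict.mk _).get? num = _
  rw [hitems]
  apply get?_mk_append
  have : ((PySem.List.enumerate u (0:Int)).map (fun p => (p.2, p.1))).map Prod.fst = u := by
    rw [List.map_map]
    exact PySem.List.map_snd_enumerate u 0
  rw [this]; exact h

theorem insert_mkN (u : List Int) (num : Int) (h : num ∉ u) :
    (mkN u).insert num (u.length : Int) = mkN (u ++ [num]) := by
  apply PySem.Dict.ext
  rw [PySem.Dict.items_insert_of_not_contains]
  · show _ ++ _ = List.map _ _
    rw [enumerate_append]
    simp [PySem.List.enumerate_cons, PySem.List.enumerate_nil]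
    rfl
  · rw [contains_mkN]; simpa using h

theorem keys_mkS (u : List Int) : (mkS u).keys = PySem.List.pyRange 0 u.length 1 := by
  simp only [mkS, PySem.Dict.keys_mk]
  have := PySem.List.map_fst_enumerate u 0
  simpa using this

theorem insert_mkS (u : List Int) (num : Int) :
    (mkS u).insert (u.length : Int) num = mkS (u ++ [num]) := by
  apply PySem.Dict.ext
  rw [PySem.Dict.items_insert_of_not_contains]
  · show _ ++ _ = _
    rw [show mkS (u ++ [num]) = PySem.Dict.mk (PySem.List.enumerate (u ++ [num])) from rfl]
    rw [enumerate_append]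
    simp [PySem.List.enumerate_cons, PySem.List.enumerate_nil]
    rfl
  · rw [PySem.Dict.contains_eq_decide_mem_keys, keys_mkS]
    simp [PySem.List.mem_pyRange_one]

theorem ofList_fresh (l : List (Int × Int)) (h : (l.map Prod.fst).Nodup) :
    PySem.Dict.ofList l = PySem.Dict.mk l := by
  apply PySem.Dict.ext
  have := PySem.Dict.items_foldl_insert_fresh (l := l) (k := Prod.fst) (v := Prod.snd)
    (d := PySem.Dict.empty) (by intro a _; rfl) h
  simpa using this

theorem update_split (u t : List Int) : ∃ w, PySem.Set.update u t = u ++ w :=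
  ⟨_, PySem.Set.update_eq_append_filter u t⟩

-- invariant of A's inner loop: from the canonical state of seen-list u it reaches the
-- canonical state of u.update(t), appending each element's final standardized index
theorem inner_fold (t : List Int) : ∀ (u pair : List Int),
    t.foldl siInnerA (mkN u, pair, mkS u, (u.length : Int))
      = (mkN (PySem.Set.update u t),
         pair ++ t.map (fun num => (mkN (PySem.Set.update u t)).getD num 0),
         mkS (PySem.Set.update u t),
         ((PySem.Set.update u t).length : Int)) := by
  induction t with
  | nil => intro u pair; simp [PySem.Set.update_nil]
  | cons num t ih =>
      intro u pair
      rw [List.foldl_cons]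
      by_cases hm : num ∈ u
      · have hstep : siInnerA (mkN u, pair, mkS u, (u.length : Int)) num
            = (mkN u, pair ++ [(mkN u).getD num 0], mkS u, (u.length : Int)) := by
          simp [siInnerA, contains_mkN, hm]
        rw [hstep, ih u]
        have hu' : PySem.Set.update u (num :: t) = PySem.Set.update u t := by
          rw [PySem.Set.update_cons, PySem.Set.add_of_mem hm]
        rw [hu']
        obtain ⟨w, hw⟩ := update_split u t
        have hg : (mkN (PySem.Set.update u t)).getD num 0 = (mkN u).getD num 0 := by
          rw [hw]; exact getD_mkN_stable u w num hm
        simp [hg]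
      · have hstep : siInnerA (mkN u, pair, mkS u, (u.length : Int)) num
            = (mkN (u ++ [num]), pair ++ [(mkN (u ++ [num])).getD num 0],
               mkS (u ++ [num]), ((u ++ [num]).length : Int)) := by
          simp only [siInnerA, contains_mkN]
          rw [if_pos (by simpa using hm)]
          rw [insert_mkN u num hm, insert_mkS u num]
          simp
        rw [hstep, ih (u ++ [num])]
        have hu' : PySem.Set.update u (num :: t) = PySem.Set.update (u ++ [num]) t := by
          rw [PySem.Set.update_cons, PySem.Set.add_of_not_mem hm]
        rw [hu']
        obtain ⟨w, hw⟩ := update_split (u ++ [num]) t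
        have hg : (mkN (PySem.Set.update (u ++ [num]) t)).getD num 0
            = (mkN (u ++ [num])).getD num 0 := by
          rw [hw]; exact getD_mkN_stable (u ++ [num]) w num (by simp)
        simp [hg]

-- invariant of A's outer loop
theorem outer_fold (ls : List (List Int)) : ∀ (u : List Int) (acc : List (List Int)),
    ls.foldl siOuterA (mkN u, acc, mkS u, (u.length : Int))
      = (mkN (PySem.Set.update u (ls.flatMap (fun t => t))),
         acc ++ ls.map (fun t => t.map (fun num =>
           (mkN (PySem.Set.update u (ls.flatMap (fun t => t)))).getD num 0)),
         mkS (PySem.Set.update u (ls.flatMap (fun t => t))),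
         ((PySem.Set.update u (ls.flatMap (fun t => t))).length : Int)) := by
  induction ls with
  | nil => intro u acc; simp [PySem.Set.update_nil]
  | cons t ls ih =>
      intro u acc
      rw [List.foldl_cons]
      have hstep : siOuterA (mkN u, acc, mkS u, (u.length : Int)) t
          = (mkN (PySem.Set.update u t),
             acc ++ [t.map (fun num => (mkN (PySem.Set.update u t)).getD num 0)],
             mkS (PySem.Set.update u t),
             ((PySem.Set.update u t).length : Int)) := by
        show (_, _, _, _) = _
        rw [show ((mkN u, acc, mkS u, (u.length:Int)).1,
              ([] : List Int), (mkN u, acc, mkS u, (u.length:Int)).2.2.1,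
              (mkN u, acc, mkS u, (u.length:Int)).2.2.2) = (mkN u, ([] : List Int), mkS u, (u.length:Int)) from rfl,
            inner_fold t u []]
        simp
      rw [hstep, ih (PySem.Set.update u t)]
      have hw : PySem.Set.update (PySem.Set.update u t) (ls.flatMap (fun t => t))
          = PySem.Set.update u ((t :: ls).flatMap (fun t => t)) := by
        rw [List.flatMap_cons, PySem.Set.update_append]
      rw [hw]
      obtain ⟨w', hw'⟩ := update_split (PySem.Set.update u t) (ls.flatMap (fun t => t))
      have hrow : t.map (fun num => (mkN (PySem.Set.update u t)).getD num 0)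
          = t.map (fun num => (mkN (PySem.Set.update u ((t :: ls).flatMap (fun t => t)))).getD num 0) := by
        apply List.map_congr_left
        intro num hnum
        rw [← hw, hw']
        exact (getD_mkN_stable _ w' num (by rw [PySem.Set.mem_update]; right; exact hnum)).symm
      simp [hrow]

theorem standardize_indexes_eq (lst : List (List Int)) :
    standardize_indexes lst = standardize_indexes_alt lst := by
  have hU : PySem.Set.update ([] : List Int) (lst.flatMap (fun t => t))
      = PySem.List.dedup (lst.flatMap (fun t => t)) := by
    simp [PySem.Set.update_nil_left]
  have hnd : (PySem.List.dedup (lst.flatMap (fun t => t))).Nodup := by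
    simp only [PySem.List.dedup_eq_ofList]; exact PySem.Set.nodup_ofList _
  set U := PySem.List.dedup (lst.flatMap (fun t => t)) with hUdef
  have h0 : ((PySem.Dict.empty : PySem.Dict Int Int), ([] : List (List Int)),
      (PySem.Dict.empty : PySem.Dict Int Int), (0 : Int))
      = (mkN [], ([] : List (List Int)), mkS [], ((([] : List Int)).length : Int)) := rfl
  have h1 : (((PySem.List.enumerate U).map (fun p => (p.2, p.1))).map Prod.fst).Nodup := by
    rw [List.map_map]
    have : ((PySem.List.enumerate U).map (Prod.fst ∘ fun p : Int × Int => (p.2, p.1)))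
        = (PySem.List.enumerate U).map (fun p => p.2) := rfl
    rw [this, PySem.List.map_snd_enumerate U 0]
    exact hnd
  have h2 : ((PySem.List.enumerate U).map Prod.fst).Nodup := by
    have : (PySem.List.enumerate U).map Prod.fst = (PySem.List.enumerate U).map (fun p => p.1) := rfl
    rw [this, PySem.List.map_fst_enumerate U 0]
    exact PySem.List.nodup_pyRange_one 0 _
  show ((lst.foldl siOuterA _).2.1, (lst.foldl siOuterA _).2.2.1.items) = _
  rw [h0, outer_fold lst [] [], hU]
  rw [show standardize_indexes_alt lst
      = (lst.map (fun t => t.map (fun num =>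
          (PySem.Dict.ofList ((PySem.List.enumerate U).map (fun p => (p.2, p.1)))).getD num 0)),
         (PySem.Dict.ofList (PySem.List.enumerate U)).items) from rfl]
  rw [ofList_fresh _ h1, ofList_fresh _ h2]
  simp [mkN, mkS]

-- ===== VERDICT (by name: the statement is the Claim_ definition above) =====
theorem standardize_indexes_spec : Claim_equal_standardize_indexes := by
  intro lst _
  exact standardize_indexes_eq lst
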